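-- pv_equiv track=rewrite | github.com/summerzahara/AdventofCode2023 | Day_3/d3p2.py | create_index_dict
-- ===== SOURCE A (Python) =====
-- def create_index_dict(list):
--     all_dict = {}
--     for row in list:
--         id = list.index(row)
--         start_index = 0
--         while start_index < len(row):
--             end_index = start_index
--             while end_index < len(row) and row[end_index].isdigit():
--                 end_index += 1
--             if start_index != end_index:
--                 number = row[start_index:end_index]
--                 if id in all_dict.keys():
--                     all_dict[id][0].append(number)
--                     all_dict[id][1].append((start_index, end_index - 1))
--                 else:
--                     all_dict[id] = ([number],[])
--                     all_dict[id][1].append((start_index, end_index - 1))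
--             start_index = end_index + 1
--     # ic(all_dict)
--     return all_dict
-- ===== SOURCE B (Python) =====
-- def create_index_dict(list):
--     # Staged, position-set based: collect digit positions, derive run boundaries
--     # arithmetically from set membership, then do one dict write per row.
--     all_dict = {}
--     for row in list:
--         pos = [i for i, ch in enumerate(row) if ch.isdigit()]
--         ps = set(pos)
--         starts = [i for i in pos if i - 1 not in ps]
--         ends = [i for i in pos if i + 1 not in ps]
--         if not starts:
--             continue
--         key = list.index(row)
--         nums, spans = all_dict.get(key, ([], []))
--         all_dict[key] = (nums + [row[s:e + 1] for s, e in zip(starts, ends)],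
--                          spans + [*zip(starts, ends)])
--     return all_dict
-- ===== Notes on version B (the rewrite author's own statement) =====
-- stated objective: alternative
-- what changed: A's nested while-loops that walk each row sequentially are replaced by a staged, position-set formulation: per row B first lists all digit positions, turns them into a set, derives run starts/ends arithmetically (a position starts a run iff pos-1 is not in the set, ends one iff pos+1 is not), zips them into runs, and performs a single dict write per row instead of one append per run; B also only pays the O(n) list.index scan for rows that actually contain digits.
import Mathlib
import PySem

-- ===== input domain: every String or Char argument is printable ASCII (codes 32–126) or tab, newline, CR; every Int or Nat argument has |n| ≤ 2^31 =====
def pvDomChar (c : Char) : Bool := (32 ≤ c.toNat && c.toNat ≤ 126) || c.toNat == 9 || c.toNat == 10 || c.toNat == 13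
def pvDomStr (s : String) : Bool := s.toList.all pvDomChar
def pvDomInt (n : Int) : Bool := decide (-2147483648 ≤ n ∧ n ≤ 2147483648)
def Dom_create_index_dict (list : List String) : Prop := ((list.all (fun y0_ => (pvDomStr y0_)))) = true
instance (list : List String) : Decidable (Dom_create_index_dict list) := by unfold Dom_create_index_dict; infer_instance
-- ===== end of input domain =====

-- B replaces A's sequential nested while-loop scan by a staged position-set computation
-- (digit positions -> set -> run starts/ends by set membership -> zip) with one dict
-- write per row; same return value. A mutates nothing observable.

-- ===== PORT A =====
-- inner while: 'while end_index < len(row) and row[end_index].isdigit(): end_index += 1'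
def endScanA (row : List Char) (e : Nat) : Nat :=
  if h : e < row.length then
    if PySem.Chars.isdigit row[e] then endScanA row (e + 1) else e
  else e
termination_by row.length - e
decreasing_by omega

theorem endScanA_ge (row : List Char) (e : Nat) : e ≤ endScanA row e := by
  rw [endScanA]
  split
  · split
    · have := endScanA_ge row (e + 1); omega
    · exact le_refl e
  · exact le_refl e
termination_by row.length - e
decreasing_by omega

-- outer while over start_index, carrying all_dict
def rowLoopA (all : PySem.Dict Int (List String × List (Int × Int))) (id : Int)
    (row : List Char) (s : Nat) : PySem.Dict Int (List String × List (Int × Int)) :=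
  if s < row.length then
    rowLoopA
      (if s ≠ endScanA row s then
        (if all.contains id then
          all.modify id ([], [])
            (fun p => (p.1 ++ [String.ofList (PySem.List.slice row (some (s : Int)) (some (endScanA row s : Int)))],
                       p.2 ++ [((s : Int), (endScanA row s : Int) - 1)]))
        else
          (all.insert id ([String.ofList (PySem.List.slice row (some (s : Int)) (some (endScanA row s : Int)))], [])).modify id ([], [])
            (fun p => (p.1, p.2 ++ [((s : Int), (endScanA row s : Int) - 1)])))
      else all)
      id row (endScanA row s + 1)
  else all
termination_by row.length - s
decreasing_by have := endScanA_ge row s; omega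

def create_index_dict (list : List String) : List (Int × List String × (List (Int × Int))) :=
  (list.foldl (fun all row =>
      -- id = list.index(row): row is drawn from list, so index? is always some; getD 0 never fires
      let id : Int := (((PySem.List.index? list row).getD 0 : Nat) : Int)
      rowLoopA all id row.toList 0)
    PySem.Dict.empty).items

-- ===== PORT B =====
def create_index_dict_alt (list : List String) : List (Int × List String × (List (Int × Int))) :=
  (list.foldl (fun all row =>
      let r := row.toList
      -- pos = [i for i, ch in enumerate(row) if ch.isdigit()]
      let pos : List Int := ((PySem.List.enumerate r).filter (fun p => PySem.Chars.isdigit p.2)).map (·.1)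
      let ps : PySem.Set Int := PySem.Set.ofList pos
      -- starts/ends of maximal digit runs, read off the position set
      let starts := pos.filter (fun i => !(PySem.Set.contains ps (i - 1)))
      let ends := pos.filter (fun i => !(PySem.Set.contains ps (i + 1)))
      if starts.isEmpty then all
      else
        let key : Int := (((PySem.List.index? list row).getD 0 : Nat) : Int)
        let cur := all.getD key ([], [])
        all.insert key
          (cur.1 ++ (starts.zip ends).map (fun p => String.ofList (PySem.List.slice r (some p.1) (some (p.2 + 1)))),
           cur.2 ++ starts.zip ends))
    PySem.Dict.empty).items

-- ===== PRECONDITION & SPEC =====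
def Spec_create_index_dict (list : List String) (out : List (Int × List String × (List (Int × Int)))) : Prop := out = create_index_dict_alt list
instance (list : List String) (out : List (Int × List String × (List (Int × Int)))) : Decidable (Spec_create_index_dict list out) := by unfold Spec_create_index_dict; infer_instance

-- ===== CLAIM (what is proved, stated in full; the proofs are below) =====
def Claim_equal_create_index_dict : Prop := ∀ (list : List String), Dom_create_index_dict list → Spec_create_index_dict list (create_index_dict list)

-- ===== LEMMAS AND PROOFS =====

-- 'is a digit at index n' (false out of range)
def dig (r : List Char) (n : Nat) : Bool :=
  if h : n < r.length then PySem.Chars.isdigit r[n] else false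

def startP (r : List Char) (n : Nat) : Bool := dig r n && (n == 0 || !dig r (n - 1))
def endP (r : List Char) (n : Nat) : Bool := dig r n && !dig r (n + 1)

def sfrom (r : List Char) (j : Nat) : List Nat :=
  (List.range r.length).filter (fun n => decide (j ≤ n) && startP r n)
def efrom (r : List Char) (j : Nat) : List Nat :=
  (List.range r.length).filter (fun n => decide (j ≤ n) && endP r n)

def mkRun (r : List Char) (p : Nat × Nat) : String × (Int × Int) :=
  (String.ofList (PySem.List.slice r (some (p.1 : Int)) (some ((p.2 : Int) + 1))), ((p.1 : Int), (p.2 : Int)))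

-- A's run list for a row starting at position s
def runsA (row : List Char) (s : Nat) : List (String × (Int × Int)) :=
  if s < row.length then
    if s ≠ endScanA row s then
      (String.ofList (PySem.List.slice row (some (s : Int)) (some (endScanA row s : Int))),
        ((s : Int), (endScanA row s : Int) - 1)) :: runsA row (endScanA row s + 1)
    else runsA row (endScanA row s + 1)
  else []
termination_by row.length - s
decreasing_by all_goals (have := endScanA_ge row s; omega)

-- one dict update for one run (what A does per run)
def appendOne (id : Int) (all : PySem.Dict Int (List String × List (Int × Int)))
    (r : String × (Int × Int)) : PySem.Dict Int (List String × List (Int × Int)) :=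
  if all.contains id then
    all.modify id ([], []) (fun p => (p.1 ++ [r.1], p.2 ++ [r.2]))
  else all.insert id ([r.1], [r.2])

theorem rowLoopA_eq_foldl (id : Int) (row : List Char) (s : Nat)
    (all : PySem.Dict Int (List String × List (Int × Int))) :
    rowLoopA all id row s = (runsA row s).foldl (appendOne id) all := by
  rw [rowLoopA, runsA]
  by_cases hlt : s < row.length
  · simp only [if_pos hlt]
    by_cases hne : s ≠ endScanA row s
    · simp only [if_pos hne, List.foldl_cons]
      rw [rowLoopA_eq_foldl id row (endScanA row s + 1)]
      congr 1
      unfold appendOne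
      split
      · rfl
      · simp [PySem.Dict.modify, PySem.Dict.getD_insert_self, PySem.Dict.insert_insert_self]
    · simp only [if_neg hne]
      exact rowLoopA_eq_foldl id row (endScanA row s + 1) all
  · simp [hlt]
termination_by row.length - s
decreasing_by all_goals (have := endScanA_ge row s; omega)

theorem foldl_appendOne_bulk (id : Int) (rs : List (String × (Int × Int))) (hne : rs ≠ [])
    (all : PySem.Dict Int (List String × List (Int × Int))) :
    rs.foldl (appendOne id) all =
      (if all.contains id then
        all.modify id ([], []) (fun p => (p.1 ++ rs.map (·.1), p.2 ++ rs.map (·.2)))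
      else all.insert id (rs.map (·.1), rs.map (·.2))) := by
  match rs with
  | [] => exact absurd rfl hne
  | [r] =>
    simp only [List.foldl_cons, List.foldl_nil, appendOne, List.map_cons, List.map_nil]
  | r :: r' :: rest =>
    rw [List.foldl_cons, foldl_appendOne_bulk id (r' :: rest) (by simp)]
    unfold appendOne
    by_cases hc : all.contains id = true
    · simp only [PySem.Dict.modify, hc, if_true, PySem.Dict.contains_insert_self,
        PySem.Dict.getD_insert_self, PySem.Dict.insert_insert_self, List.map_cons]
      congr 2 <;> simp
    · simp only [PySem.Dict.modify, hc, if_false, if_true, Bool.false_eq_true,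
        PySem.Dict.contains_insert_self, PySem.Dict.getD_insert_self,
        PySem.Dict.insert_insert_self, List.map_cons]
      congr 2

-- facts about the inner scan
theorem endScanA_dig (row : List Char) (s : Nat) :
    ∀ k, s ≤ k → k < endScanA row s → dig row k = true := by
  intro k hk1 hk2
  rw [endScanA] at hk2
  by_cases h : s < row.length
  · simp only [dif_pos h] at hk2
    by_cases hd : PySem.Chars.isdigit row[s] = true
    · rw [if_pos hd] at hk2
      rcases Nat.eq_or_lt_of_le hk1 with h1 | h1
      · subst h1; simp [dig, h, hd]
      · exact endScanA_dig row (s + 1) k h1 hk2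
    · rw [if_neg hd] at hk2; omega
  · simp only [dif_neg h] at hk2; omega
termination_by row.length - s
decreasing_by omega

theorem endScanA_stop (row : List Char) (s : Nat) : dig row (endScanA row s) = false := by
  rw [endScanA]
  by_cases h : s < row.length
  · simp only [dif_pos h]
    by_cases hd : PySem.Chars.isdigit row[s] = true
    · rw [if_pos hd]; exact endScanA_stop row (s + 1)
    · rw [if_neg hd]; simp [dig, h, hd]
  · simp only [dif_neg h]
    simp [dig, h]
termination_by row.length - s
decreasing_by omega

theorem endScanA_gt (row : List Char) (s : Nat) (hd : dig row s = true) :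
    s + 1 ≤ endScanA row s := by
  unfold dig at hd
  by_cases h : s < row.length
  · simp only [dif_pos h] at hd
    rw [endScanA]
    simp only [dif_pos h, if_pos hd]
    exact endScanA_ge row (s + 1)
  · simp [dif_neg h] at hd

theorem dig_lt (row : List Char) (n : Nat) (h : dig row n = true) : n < row.length := by
  by_contra hc
  simp [dig, hc] at h

-- generic: filter over range splits off its first hit
theorem filter_range_cons (len a : Nat) (p q : Nat → Bool)
    (ha : a < len) (hpa : p a = true)
    (hlow : ∀ n, n < a → p n = false)
    (hqlow : ∀ n, n ≤ a → q n = false)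
    (hhigh : ∀ n, a < n → n < len → p n = q n) :
    (List.range len).filter p = a :: (List.range len).filter q := by
  obtain ⟨b, rfl⟩ : ∃ b, len = (a + 1) + b := ⟨len - (a + 1), by omega⟩
  rw [List.range_add, List.filter_append, List.filter_append, List.range_succ,
    List.filter_append, List.filter_append]
  have h1 : (List.range a).filter p = [] := by
    rw [List.filter_eq_nil_iff]; intro n hn
    simp [hlow n (List.mem_range.mp hn)]
  have h2 : [a].filter p = [a] := by simp [hpa]
  have h3 : (List.range a).filter q = [] := by
    rw [List.filter_eq_nil_iff]; intro n hn
    simp [hqlow n (le_of_lt (List.mem_range.mp hn))]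
  have h4 : [a].filter q = [] := by simp [hqlow a (le_refl a)]
  have h5 : ((List.range b).map (a + 1 + ·)).filter p = ((List.range b).map (a + 1 + ·)).filter q := by
    rw [List.filter_map, List.filter_map]
    congr 1
    apply List.filter_congr
    intro m hm
    exact hhigh (a + 1 + m) (by omega) (by have := List.mem_range.mp hm; omega)
  rw [h1, h2, h3, h4, h5]
  simp

theorem filter_range_shift (len j : Nat) (P : Nat → Bool) (hPj : P j = false) :
    (List.range len).filter (fun n => decide (j ≤ n) && P n)
      = (List.range len).filter (fun n => decide (j + 1 ≤ n) && P n) := by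
  apply List.filter_congr
  intro n _
  by_cases h : n = j
  · subst h; simp [hPj]
  · have : (j ≤ n) ↔ (j + 1 ≤ n) := by omega
    simp [this]

theorem filter_range_ge_empty (len j : Nat) (P : Nat → Bool) (hj : len ≤ j) :
    (List.range len).filter (fun n => decide (j ≤ n) && P n) = [] := by
  rw [List.filter_eq_nil_iff]
  intro n hn
  have := List.mem_range.mp hn
  simp; omega

-- main characterisation: A's sequential runs = zip of set-derived starts/ends
theorem runsA_eq (r : List Char) (j : Nat) (hj : j = 0 ∨ dig r (j - 1) = false) :
    runsA r j = ((sfrom r j).zip (efrom r j)).map (mkRun r)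
      ∧ (sfrom r j).length = (efrom r j).length := by
  by_cases hlen : j < r.length
  · by_cases hd : dig r j = true
    · -- digit at j: a run [j, e) is split off
      have hje : j + 1 ≤ endScanA r j := endScanA_gt r j hd
      have hdigs : ∀ k, j ≤ k → k < endScanA r j → dig r k = true := endScanA_dig r j
      have hstop : dig r (endScanA r j) = false := endScanA_stop r j
      have he1 : endScanA r j - 1 < r.length :=
        dig_lt r (endScanA r j - 1) (hdigs _ (by omega) (by omega))
      have hs : sfrom r j = j :: sfrom r (endScanA r j + 1) := by
        apply filter_range_cons
        · exact hlen
        · have h0 : (j == 0 || !dig r (j - 1)) = true := by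
            rcases hj with h | h
            · subst h; simp
            · simp [h]
          simp [startP, hd, h0]
        · intro n hn; simp; omega
        · intro n hn; simp; omega
        · intro n hn1 hn2
          by_cases hne : n ≤ endScanA r j
          · have hdp : dig r (n - 1) = true := hdigs (n - 1) (by omega) (by omega)
            have hsp : startP r n = false := by
              simp [startP, hdp]; omega
            simp [hsp]
          · have h1 : (j ≤ n) := by omega
            have h2 : (endScanA r j + 1 ≤ n) := by omega
            simp [h1, h2]
      have he : efrom r j = (endScanA r j - 1) :: efrom r (endScanA r j + 1) := by
        apply filter_range_cons
        · exact he1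
        · have h1 : endScanA r j - 1 + 1 = endScanA r j := by omega
          have h2 : dig r (endScanA r j - 1) = true := hdigs _ (by omega) (by omega)
          have h3 : (j ≤ endScanA r j - 1) := by omega
          simp [endP, h1, h2, h3, hstop]
        · intro n hn
          by_cases hnj : j ≤ n
          · have hdp : dig r (n + 1) = true := hdigs (n + 1) (by omega) (by omega)
            simp [endP, hdp]
          · simp; omega
        · intro n hn; simp; omega
        · intro n hn1 hn2
          by_cases hne : n = endScanA r j
          · subst hne; simp [endP, hstop]
          · have h1 : (j ≤ n) := by omega
            have h2 : (endScanA r j + 1 ≤ n) := by omega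
            simp [h1, h2]
      have ih := runsA_eq r (endScanA r j + 1) (Or.inr (by simpa using hstop))
      have hrun : runsA r j =
          (String.ofList (PySem.List.slice r (some (j : Int)) (some (endScanA r j : Int))),
            ((j : Int), (endScanA r j : Int) - 1)) :: runsA r (endScanA r j + 1) := by
        rw [runsA]
        simp only [if_pos hlen]
        rw [if_pos (by omega : j ≠ endScanA r j)]
      have hcast1 : ((endScanA r j - 1 : Nat) : Int) = (endScanA r j : Int) - 1 := by omega
      constructor
      · rw [hrun, hs, he, List.zip_cons_cons, List.map_cons, ih.1]
        simp [mkRun, hcast1]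
      · rw [hs, he]
        simp [ih.2]
    · -- no digit at j: skip one position
      have hd' : dig r j = false := by simpa using hd
      have he : endScanA r j = j := by
        have hd2 : PySem.Chars.isdigit r[j] = false := by
          unfold dig at hd'; simpa [dif_pos hlen] using hd'
        rw [endScanA]; simp [hlen, hd2]
      have hs : sfrom r j = sfrom r (j + 1) :=
        filter_range_shift r.length j _ (by simp [startP, hd'])
      have hef : efrom r j = efrom r (j + 1) :=
        filter_range_shift r.length j _ (by simp [endP, hd'])
      have ih := runsA_eq r (j + 1) (Or.inr (by simpa using hd'))
      have hrun : runsA r j = runsA r (j + 1) := by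
        rw [runsA]
        simp only [if_pos hlen, he]
        rw [if_neg (by omega : ¬ j ≠ j)]
      rw [hrun, hs, hef]
      exact ih
  · -- past the end: everything is empty
    have h1 : sfrom r j = [] := filter_range_ge_empty _ _ _ (by omega)
    have h2 : efrom r j = [] := filter_range_ge_empty _ _ _ (by omega)
    rw [runsA]
    simp [hlen, h1, h2]
termination_by r.length - j
decreasing_by all_goals omega

-- bridge from port B's enumerate/set formulation to sfrom/efrom
def posN (r : List Char) : List Nat := (List.range r.length).filter (dig r)
def posInt (r : List Char) : List Int := (posN r).map (fun n => ((n : Nat) : Int))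

theorem enum_shift (xs : List Char) : ∀ (s : Int),
    PySem.List.enumerate xs (s + 1) = (PySem.List.enumerate xs s).map (fun p => (p.1 + 1, p.2)) := by
  induction xs with
  | nil => intro s; simp [PySem.List.enumerate_nil]
  | cons c t ih =>
    intro s
    rw [PySem.List.enumerate_cons, PySem.List.enumerate_cons, List.map_cons, ih (s + 1)]

theorem dig_cons_succ (c : Char) (t : List Char) (n : Nat) : dig (c :: t) (n + 1) = dig t n := by
  simp [dig]

theorem pos_eq (r : List Char) :
    ((PySem.List.enumerate r).filter (fun p => PySem.Chars.isdigit p.2)).map (·.1) = posInt r := by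
  induction r with
  | nil => simp [PySem.List.enumerate_nil, posInt, posN]
  | cons c t ih =>
    have hshift : PySem.List.enumerate t 1 = (PySem.List.enumerate t 0).map (fun p => (p.1 + 1, p.2)) := by
      have := enum_shift t 0; simpa using this
    rw [show PySem.List.enumerate (c :: t) = PySem.List.enumerate (c :: t) 0 from rfl,
      PySem.List.enumerate_cons, List.filter_cons]
    rw [show ((0 : Int) + 1) = (1 : Int) by norm_num, hshift, List.filter_map]
    have hcomp : ((fun p => PySem.Chars.isdigit p.2) ∘ (fun p : Int × Char => (p.1 + 1, p.2)))
        = (fun p : Int × Char => PySem.Chars.isdigit p.2) := rfl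
    rw [hcomp]
    have hRHS : posInt (c :: t) =
        (if PySem.Chars.isdigit c then [(0 : Int)] else []) ++ (posInt t).map (· + 1) := by
      unfold posInt posN
      rw [show (c :: t).length = t.length + 1 from rfl, List.range_succ_eq_map,
        List.filter_cons, List.filter_map]
      have h0 : dig (c :: t) 0 = PySem.Chars.isdigit c := by simp [dig]
      have hcomp2 : (dig (c :: t) ∘ Nat.succ) = dig t := by
        funext n; exact dig_cons_succ c t n
      rw [hcomp2, h0]
      by_cases hc : PySem.Chars.isdigit c = true
      · simp only [hc, if_pos, List.map_cons, List.map_map, Function.comp_def,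
          Nat.cast_zero, List.singleton_append]
        congr 1
      · simp only [hc, Bool.false_eq_true, if_false, List.map_map, Function.comp_def,
          List.nil_append]
        apply List.map_congr_left
        intro n _
        push_cast; ring
    rw [hRHS]
    by_cases hc : PySem.Chars.isdigit c = true
    · simp only [hc, if_pos, List.map_cons, List.singleton_append]
      rw [List.map_map, show (((·.1) : Int × Char → Int) ∘ (fun p : Int × Char => (p.1 + 1, p.2)))
          = ((fun i : Int => i + 1) ∘ ((·.1) : Int × Char → Int)) from rfl]
      rw [← List.map_map, ih]
    · simp only [hc, Bool.false_eq_true, if_false, List.nil_append]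
      rw [List.map_map, show (((·.1) : Int × Char → Int) ∘ (fun p : Int × Char => (p.1 + 1, p.2)))
          = ((fun i : Int => i + 1) ∘ ((·.1) : Int × Char → Int)) from rfl]
      rw [← List.map_map, ih]

theorem mem_posInt (r : List Char) (y : Int) :
    y ∈ posInt r ↔ ∃ n : Nat, y = (n : Int) ∧ dig r n = true := by
  unfold posInt posN
  simp only [List.mem_map, List.mem_filter, List.mem_range]
  constructor
  · rintro ⟨n, ⟨_, hd⟩, rfl⟩; exact ⟨n, rfl, hd⟩
  · rintro ⟨n, rfl, hd⟩; exact ⟨n, ⟨dig_lt r n hd, hd⟩, rfl⟩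

theorem contains_cast (r : List Char) (m : Nat) :
    (PySem.Set.ofList (posInt r)).contains ((m : Nat) : Int) = dig r m := by
  apply Bool.eq_iff_iff.mpr
  simp only [PySem.Set.contains, List.elem_iff, PySem.Set.mem_ofList, mem_posInt]
  constructor
  · rintro ⟨n, hn, hd⟩
    have : m = n := by exact_mod_cast hn
    subst this; exact hd
  · intro h; exact ⟨m, rfl, h⟩

theorem starts_eq (r : List Char) :
    (posInt r).filter (fun i => !((PySem.Set.ofList (posInt r)).contains (i - 1)))
      = (sfrom r 0).map (fun n => ((n : Nat) : Int)) := by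
  unfold posInt
  rw [List.filter_map]
  congr 1
  unfold posN
  rw [List.filter_filter]
  apply List.filter_congr
  intro n _
  by_cases hdn : dig r n = true
  · by_cases hn0 : n = 0
    · subst hn0
      simp [hdn, startP]
    · have hc : ((n : Nat) : Int) - 1 = (((n - 1 : Nat)) : Int) := by omega
      simp only [Function.comp_def, hc, hdn, startP, Bool.and_true, Bool.true_and]
      by_cases hdm : dig r (n - 1) = true
      · have hlt := dig_lt r (n - 1) hdm
        simp [hdm, hn0, hlt]
      · simp [hdm]
  · simp only [Bool.not_eq_true] at hdn
    simp [hdn, startP]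

theorem ends_eq (r : List Char) :
    (posInt r).filter (fun i => !((PySem.Set.ofList (posInt r)).contains (i + 1)))
      = (efrom r 0).map (fun n => ((n : Nat) : Int)) := by
  unfold posInt
  rw [List.filter_map]
  congr 1
  unfold posN
  rw [List.filter_filter]
  apply List.filter_congr
  intro n _
  by_cases hdn : dig r n = true
  · have hcc : (PySem.Set.ofList (List.map (fun n : Nat => ((n : Nat) : Int)) (List.filter (dig r) (List.range r.length)))).contains (((n : Nat) : Int) + 1) = dig r (n + 1) := by
      have hc : ((n : Nat) : Int) + 1 = (((n + 1 : Nat)) : Int) := by omega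
      rw [hc]; exact contains_cast r (n + 1)
    simp only [Function.comp_def]
    rw [hcc]
    simp [endP, hdn, Bool.and_comm]
  · simp only [Bool.not_eq_true] at hdn
    simp [hdn, endP]

-- the per-row step of A equals the per-row step of B
theorem rowStep_eq (key : Int) (r : List Char)
    (all : PySem.Dict Int (List String × List (Int × Int))) :
    rowLoopA all key r 0 =
      (let pos : List Int := ((PySem.List.enumerate r).filter (fun p => PySem.Chars.isdigit p.2)).map (·.1)
       let ps : PySem.Set Int := PySem.Set.ofList pos
       let starts := pos.filter (fun i => !(PySem.Set.contains ps (i - 1)))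
       let ends := pos.filter (fun i => !(PySem.Set.contains ps (i + 1)))
       if starts.isEmpty then all
       else
         let cur := all.getD key ([], [])
         all.insert key
           (cur.1 ++ (starts.zip ends).map (fun p => String.ofList (PySem.List.slice r (some p.1) (some (p.2 + 1)))),
            cur.2 ++ starts.zip ends)) := by
  simp only [pos_eq, starts_eq, ends_eq]
  obtain ⟨hruns, hlens⟩ := runsA_eq r 0 (Or.inl rfl)
  rw [rowLoopA_eq_foldl, hruns]
  by_cases hS : sfrom r 0 = []
  · have hE : efrom r 0 = [] := by
      have := hlens; rw [hS] at this; simpa using (List.length_eq_zero_iff.mp this.symm)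
    simp [hS, hE]
  · have hzip : ((sfrom r 0).map (fun n => ((n : Nat) : Int))).zip ((efrom r 0).map (fun n => ((n : Nat) : Int)))
        = ((sfrom r 0).zip (efrom r 0)).map (Prod.map (fun n => ((n : Nat) : Int)) (fun n => ((n : Nat) : Int))) :=
      List.zip_map
    have hzne : (sfrom r 0).zip (efrom r 0) ≠ [] := by
      intro h
      have hmin : min (sfrom r 0).length (efrom r 0).length = 0 := by
        rw [← List.length_zip, h]; rfl
      rw [← hlens, min_self] at hmin
      exact hS (List.length_eq_zero_iff.mp hmin)
    have hne : ((sfrom r 0).zip (efrom r 0)).map (mkRun r) ≠ [] := by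
      simpa using hzne
    rw [foldl_appendOne_bulk key _ hne all]
    have hempty : (((sfrom r 0).map (fun n => ((n : Nat) : Int))).isEmpty) = false := by
      simp [hS]
    simp only [hempty, Bool.false_eq_true, if_false]
    have hmap1 : (((sfrom r 0).zip (efrom r 0)).map (mkRun r)).map (·.1)
        = ((((sfrom r 0).map (fun n => ((n : Nat) : Int))).zip ((efrom r 0).map (fun n => ((n : Nat) : Int)))).map
            (fun p => String.ofList (PySem.List.slice r (some p.1) (some (p.2 + 1))))) := by
      rw [hzip, List.map_map, List.map_map]
      apply List.map_congr_left
      intro p _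
      simp [mkRun, Prod.map]
    have hmap2 : (((sfrom r 0).zip (efrom r 0)).map (mkRun r)).map (·.2)
        = (((sfrom r 0).map (fun n => ((n : Nat) : Int))).zip ((efrom r 0).map (fun n => ((n : Nat) : Int)))) := by
      rw [hzip, List.map_map]
      apply List.map_congr_left
      intro p _
      simp [mkRun, Prod.map]
    rw [hmap1, hmap2]
    by_cases hc : all.contains key = true
    · simp only [if_pos, PySem.Dict.modify, hc]
    · simp only [hc, Bool.false_eq_true, if_false]
      rw [PySem.Dict.getD_of_not_contains all ([], []) (by simpa using hc)]
      simp

-- ===== VERDICT (by name: the statement is the Claim_ definition above) =====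
theorem create_index_dict_spec : Claim_equal_create_index_dict := by
  intro list _
  unfold Spec_create_index_dict create_index_dict create_index_dict_alt
  congr 2
  funext all row
  exact rowStep_eq (((PySem.List.index? list row).getD 0 : Nat) : Int) row.toList all
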